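-- pv_equiv track=rewrite | github.com/grupy-sanca/dojos | 037/2.py | is_comfortable
-- ===== SOURCE A (Python) =====
-- def is_comfortable(word):
--     is_left = 1
--     is_right = 2
--     left = set(['q', 'w', 'e', 'r', 't', 'a', 's', 'd',
--                 'f', 'g', 'z', 'x', 'c', 'v', 'b'])
--
--     previous_position = is_left if word[0] in left else is_right
--     for char in word[1:]:
--         current_position = is_left if char in left else is_right
--         if current_position == previous_position:
--             return False
--         previous_position = current_position
--
--     return True
-- ===== SOURCE B (Python) =====
-- def is_comfortable(word):
--     left = set('qwertasdfgzxcvb')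
--     first_left = word[0] in left
--     return all((c in left) == (first_left == (i % 2 == 0))
--                for i, c in enumerate(word))
-- ===== Notes on version B (the rewrite author's own statement) =====
-- stated objective: alternative
-- what changed: B replaces A's stateful adjacent-pair loop by a global parity characterization: hands alternate iff every character's hand equals the first character's hand exactly at even indices, checked in one index-parity pass over enumerate(word).
import Mathlib
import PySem

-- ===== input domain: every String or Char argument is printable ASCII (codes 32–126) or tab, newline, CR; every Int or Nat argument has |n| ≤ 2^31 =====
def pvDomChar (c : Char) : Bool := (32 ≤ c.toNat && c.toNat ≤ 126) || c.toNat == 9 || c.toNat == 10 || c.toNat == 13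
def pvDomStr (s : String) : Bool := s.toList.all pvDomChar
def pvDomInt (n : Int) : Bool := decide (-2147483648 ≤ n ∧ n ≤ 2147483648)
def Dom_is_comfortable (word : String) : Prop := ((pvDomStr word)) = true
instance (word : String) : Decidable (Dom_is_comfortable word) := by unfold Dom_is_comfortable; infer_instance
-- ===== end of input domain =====

-- B checks the global parity characterization (hand of word[i] = hand of word[0] iff i is even)
-- instead of A's early-returning loop over adjacent pairs (objective: alternative).

-- ===== PORT A =====
def leftHand : List Char := ['q', 'w', 'e', 'r', 't', 'a', 's', 'd', 'f', 'g', 'z', 'x', 'c', 'v', 'b']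

-- the 'for char in word[1:]' loop with early return False
def isComfLoop : List Char → Int → Bool
  | [], _ => true
  | c :: rest, prev =>
    let cur : Int := if c ∈ leftHand then 1 else 2
    if cur = prev then false else isComfLoop rest cur

def is_comfortable (word : String) : Bool :=
  match PySem.Str.pyGet? word 0 with
  | none => false  -- unreachable: Pre_ excludes the empty word, where Python raises IndexError
  | some c0 =>
    let prev : Int := if c0 ∈ leftHand then 1 else 2
    isComfLoop (word.toList.drop 1) prev

-- ===== PORT B =====
def is_comfortable_alt (word : String) : Bool :=
  match PySem.Str.pyGet? word 0 with
  | none => false  -- unreachable: Pre_ excludes the empty word, where Python raises IndexError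
  | some c0 =>
    let firstLeft : Bool := decide (c0 ∈ leftHand)
    (PySem.List.enumerate word.toList).all
      (fun p => decide (p.2 ∈ leftHand) == (firstLeft == (p.1 % 2 == 0)))

-- ===== PRECONDITION & SPEC =====
-- Pre_ excludes only the empty string, on which both A and B raise IndexError at word[0].
def Pre_is_comfortable (word : String) : Prop := word ≠ ""
instance (word : String) : Decidable (Pre_is_comfortable word) := by unfold Pre_is_comfortable; infer_instance
def pvWitness_is_comfortable : String := "dish"

def Spec_is_comfortable (word : String) (out : Bool) : Prop := out = is_comfortable_alt word
instance (word : String) (out : Bool) : Decidable (Spec_is_comfortable word out) := by unfold Spec_is_comfortable; infer_instance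

-- ===== CLAIM (what is proved, stated in full; the proofs are below) =====
def Claim_equal_is_comfortable : Prop := ∀ (word : String), Dom_is_comfortable word → Pre_is_comfortable word → Spec_is_comfortable word (is_comfortable word)

-- ===== LEMMAS AND PROOFS =====

theorem beq_not_right (a x : Bool) : (a == !x) = !(a == x) := by cases a <;> cases x <;> rfl

theorem beq_beq_not (a x : Bool) : ((a == x) == (a == !x)) = false := by cases a <;> cases x <;> rfl

theorem parity_succ (s : Int) : (((s + 1) % 2 == 0) : Bool) = !(s % 2 == 0) := by
  rcases Int.emod_two_eq s with h | h
  · have h1 : (s + 1) % 2 = 1 := by omega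
    simp [h, h1]
  · have h1 : (s + 1) % 2 = 0 := by omega
    simp [h, h1]

-- A's integer position equals prev iff the boolean hand flags agree
theorem pos_eq_iff (c d : Char) :
    ((if c ∈ leftHand then (1:Int) else 2) = (if d ∈ leftHand then (1:Int) else 2)) ↔
      (decide (c ∈ leftHand) = decide (d ∈ leftHand)) := by
  by_cases hc : c ∈ leftHand <;> by_cases hd : d ∈ leftHand <;> simp [hc, hd]

-- A's remaining loop, started after a char whose hand matches the parity pattern,
-- equals B's parity check over the rest of the enumeration.
theorem loop_eq_parity (h0 : Bool) (l : List Char) (c : Char) (s : Int)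
    (H : (decide (c ∈ leftHand)) = (h0 == (s % 2 == 0))) :
    isComfLoop l (if c ∈ leftHand then (1:Int) else 2) =
      (PySem.List.enumerate l (s + 1)).all
        (fun p => decide (p.2 ∈ leftHand) == (h0 == (p.1 % 2 == 0))) := by
  induction l generalizing c s with
  | nil => simp [isComfLoop, PySem.List.enumerate_nil]
  | cons d rest ih =>
    rw [PySem.List.enumerate_cons]
    simp only [isComfLoop, List.all_cons]
    by_cases h : (if d ∈ leftHand then (1:Int) else 2) = (if c ∈ leftHand then (1:Int) else 2)
    · have hb := (pos_eq_iff d c).mp h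
      rw [if_pos h]
      rw [hb, H, parity_succ, beq_beq_not]
      simp
    · rw [if_neg h]
      have hb : decide (d ∈ leftHand) ≠ decide (c ∈ leftHand) := fun hc => h ((pos_eq_iff d c).mpr hc)
      have hd : decide (d ∈ leftHand) = !(decide (c ∈ leftHand)) := by
        cases hcc : decide (c ∈ leftHand) <;> cases hdd : decide (d ∈ leftHand) <;>
          simp_all
      have H' : (decide (d ∈ leftHand)) = (h0 == ((s + 1) % 2 == 0)) := by
        rw [hd, H, parity_succ, beq_not_right]
      rw [ih d (s + 1) H', H', parity_succ, beq_not_right]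
      simp

-- ===== VERDICT (by name: the statement is the Claim_ definition above) =====
theorem is_comfortable_spec : Claim_equal_is_comfortable := by
  intro word _ hpre
  unfold Spec_is_comfortable is_comfortable is_comfortable_alt
  match hw : word.toList with
  | [] => exact absurd (String.toList_eq_nil_iff.mp hw) hpre
  | c :: rest =>
    have hg : PySem.Str.pyGet? word 0 = some c := by
      rw [show ((0:Int)) = ((0:Nat) : Int) from rfl, PySem.Str.pyGet?_natCast, hw]; rfl
    simp only [hg, List.drop_one, List.tail_cons]
    rw [PySem.List.enumerate_cons, List.all_cons]
    have h0 : ((decide (c ∈ leftHand)) == ((decide (c ∈ leftHand)) == ((0:Int) % 2 == 0))) = true := by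
      cases decide (c ∈ leftHand) <;> rfl
    rw [h0, Bool.true_and]
    exact loop_eq_parity (decide (c ∈ leftHand)) rest c 0 (by cases decide (c ∈ leftHand) <;> rfl)
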